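-- pv_equiv track=rewrite | github.com/dferrante/pywx | pywx/modules/youtube.py | pretty_iso_duration
-- ===== SOURCE A (Python) =====
-- def pretty_iso_duration(iso_duration):
--     dd = {}
--     num = 0
--     timesplit = False
--     duration = []
--     iso_tags = (('Y', 'year'), ('M', 'month'), ('W', 'week'), ('D', 'day'))
--
--     for s in iso_duration:
--         if s.isdigit():
--             num = num*10 + int(s)
--             continue
--         if s == 'P':
--             continue
--         if s == 'T':
--             timesplit = True
--             continue
--         if timesplit and s == 'M':
--             s = 'MM'
--         dd[s] = num
--         num = 0
--
--     for tag, name in iso_tags: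
--         if tag in dd and dd[tag]:
--             duration.append('%s %s%s ' % (dd[tag], name, 's' if dd[tag] > 1 else ''))
--     if 'H' in dd: duration.append('%s:' % dd['H'])
--     duration.append('%02d:%02d' % (dd.get('MM', 0), dd.get('S', 0)))
--     duration = ''.join(duration)
--     return duration
-- ===== SOURCE B (Python) =====
-- def _tokens(s):
--     # split the string into (digit-run, delimiter) pairs; trailing digits have
--     # no delimiter and are dropped (as in A, where a trailing number is never stored)
--     toks = []
--     i, n = 0, len(s)
--     while i < n:
--         j = i
--         while j < n and s[j].isdigit():
--             j += 1
--         if j == n: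
--             break
--         toks.append((s[i:j], s[j]))
--         i = j + 1
--     return toks
--
--
-- def pretty_iso_duration(iso_duration):
--     dd = {}
--     numstr = ''
--     timesplit = False
--     for digits, ch in _tokens(iso_duration):
--         numstr += digits
--         if ch == 'P':
--             continue
--         if ch == 'T':
--             timesplit = True
--             continue
--         key = 'MM' if timesplit and ch == 'M' else ch
--         dd[key] = int(numstr) if numstr else 0
--         numstr = ''
--     parts = []
--     for tag, name in (('Y', 'year'), ('M', 'month'), ('W', 'week'), ('D', 'day')):
--         v = dd.get(tag, 0)
--         if v:
--             parts.append('%d %s%s ' % (v, name, 's' if v > 1 else ''))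
--     head = ''.join(parts)
--     if 'H' in dd:
--         head += '%d:' % dd['H']
--     return head + '%02d:%02d' % (dd.get('MM', 0), dd.get('S', 0))
-- ===== Notes on version B (the rewrite author's own statement) =====
-- stated objective: alternative
-- what changed: Replaces A's character-by-character state machine (running integer accumulator, per-char branching) with a two-phase design: a tokenizer producing (digit-run, delimiter) pairs followed by a token-consuming loop with a pending digit-string, and a lookup-table (get-with-default) formatting phase instead of A's membership-tested append loop.
import Mathlib
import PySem

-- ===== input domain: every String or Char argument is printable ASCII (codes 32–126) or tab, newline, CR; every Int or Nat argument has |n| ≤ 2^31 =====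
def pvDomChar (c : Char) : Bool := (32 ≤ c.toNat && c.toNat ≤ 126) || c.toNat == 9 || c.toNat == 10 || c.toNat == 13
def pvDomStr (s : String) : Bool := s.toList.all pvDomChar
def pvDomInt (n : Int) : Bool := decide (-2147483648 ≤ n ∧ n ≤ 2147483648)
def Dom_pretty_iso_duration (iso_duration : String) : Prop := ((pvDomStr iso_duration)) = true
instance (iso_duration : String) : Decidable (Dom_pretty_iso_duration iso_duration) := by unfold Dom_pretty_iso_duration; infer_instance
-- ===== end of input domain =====

-- B replaces A's char-by-char state machine by a tokenize-then-consume pass over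
-- (digit-run, delimiter) pairs and a lookup-table formatting phase (objective: alternative).

-- ===== PORT A =====
-- state: (dd, num, timesplit); 'MM' is the two-char key, other keys are one char.
-- int(s) for an ASCII digit char is ported as s.toNat - 48 (exact on the ASCII domain).
def pvAStep (st : PySem.Dict (List Char) Int × Int × Bool) (s : Char) :
    PySem.Dict (List Char) Int × Int × Bool :=
  if PySem.Chars.isdigit s then (st.1, st.2.1 * 10 + ((s.toNat : Int) - 48), st.2.2)
  else if s = 'P' then st
  else if s = 'T' then (st.1, st.2.1, true)
  else
    let key := if st.2.2 && (s = 'M') then ['M', 'M'] else [s]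
    (st.1.insert key st.2.1, 0, st.2.2)

-- one iteration of A's formatting loop over iso_tags
def pvATag (dd : PySem.Dict (List Char) Int) (duration : List (List Char))
    (p : List Char × List Char) : List (List Char) :=
  match dd.get? p.1 with
  | some v =>
      if v ≠ 0 then
        duration ++ [PySem.Int.toChars v ++ (' ' :: p.2) ++ (if v > 1 then ['s'] else []) ++ [' ']]
      else duration
  | none => duration

def pvIsoTags : List (List Char × List Char) :=
  [(['Y'], ['y','e','a','r']), (['M'], ['m','o','n','t','h']),
   (['W'], ['w','e','e','k']), (['D'], ['d','a','y'])]

def pretty_iso_duration (iso_duration : String) : String :=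
  let st := iso_duration.toList.foldl pvAStep (PySem.Dict.empty, 0, false)
  let dd := st.1
  let duration := pvIsoTags.foldl (pvATag dd) []
  let duration :=
    match dd.get? ['H'] with
    | some v => duration ++ [PySem.Int.toChars v ++ [':']]
    | none => duration
  -- '%02d' on the (always non-negative) stored values = str(n).zfill(2)
  let duration := duration ++
    [PySem.Chars.zfill (PySem.Int.toChars (dd.getD ['M','M'] 0)) 2 ++ [':'] ++
     PySem.Chars.zfill (PySem.Int.toChars (dd.getD ['S'] 0)) 2]
  String.mk duration.flatten

-- ===== PORT B =====
-- tokenizer: (maximal digit run, following non-digit) pairs; trailing digits dropped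
def pvTokens (cs : List Char) : List (List Char × Char) :=
  match h : cs.dropWhile PySem.Chars.isdigit with
  | [] => []
  | c :: r => (cs.takeWhile PySem.Chars.isdigit, c) :: pvTokens r
termination_by cs.length
decreasing_by
  have h1 : (cs.dropWhile PySem.Chars.isdigit).length ≤ cs.length :=
    List.length_dropWhile_le _ _
  rw [h] at h1; simp at h1; omega

-- int(numstr) if numstr else 0 (numstr is a run of ASCII digits)
def pvBNum (ds : List Char) : Int :=
  ds.foldl (fun a c => a * 10 + ((c.toNat : Int) - 48)) 0

-- state: (dd, pending digit string, timesplit)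
def pvBStep (st : PySem.Dict (List Char) Int × List Char × Bool) (t : List Char × Char) :
    PySem.Dict (List Char) Int × List Char × Bool :=
  let buf := st.2.1 ++ t.1
  if t.2 = 'P' then (st.1, buf, st.2.2)
  else if t.2 = 'T' then (st.1, buf, true)
  else
    let key := if st.2.2 && (t.2 = 'M') then ['M', 'M'] else [t.2]
    (st.1.insert key (pvBNum buf), [], st.2.2)

-- B's own copy of the tag table
def pvTagTable : List (List Char × List Char) :=
  [(['Y'], ['y','e','a','r']), (['M'], ['m','o','n','t','h']),
   (['W'], ['w','e','e','k']), (['D'], ['d','a','y'])]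

def pretty_iso_duration_alt (iso_duration : String) : String :=
  let dd := ((pvTokens iso_duration.toList).foldl pvBStep (PySem.Dict.empty, [], false)).1
  let parts := pvTagTable.filterMap (fun p =>
    let v := dd.getD p.1 0
    if v ≠ 0 then
      some (PySem.Int.toChars v ++ (' ' :: p.2) ++ (if v > 1 then ['s'] else []) ++ [' '])
    else none)
  let head := parts.flatten
  let head := if dd.contains ['H'] then head ++ PySem.Int.toChars (dd.getD ['H'] 0) ++ [':'] else head
  String.mk (head ++
    PySem.Chars.zfill (PySem.Int.toChars (dd.getD ['M','M'] 0)) 2 ++ [':'] ++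
    PySem.Chars.zfill (PySem.Int.toChars (dd.getD ['S'] 0)) 2)

-- ===== PRECONDITION & SPEC =====
def Spec_pretty_iso_duration (iso_duration : String) (out : String) : Prop := out = pretty_iso_duration_alt iso_duration
instance (iso_duration : String) (out : String) : Decidable (Spec_pretty_iso_duration iso_duration out) := by unfold Spec_pretty_iso_duration; infer_instance

-- ===== CLAIM (what is proved, stated in full; the proofs are below) =====
def Claim_equal_pretty_iso_duration : Prop := ∀ (iso_duration : String), Dom_pretty_iso_duration iso_duration → Spec_pretty_iso_duration iso_duration (pretty_iso_duration iso_duration)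

-- ===== LEMMAS AND PROOFS =====

-- A's loop over a run of digits only accumulates num
theorem pvA_digits (ds : List Char) (h : ∀ c ∈ ds, PySem.Chars.isdigit c = true) :
    ∀ dd n ts, ds.foldl pvAStep (dd, n, ts) =
      (dd, ds.foldl (fun a c => a * 10 + ((c.toNat : Int) - 48)) n, ts) := by
  induction ds with
  | nil => intro dd n ts; rfl
  | cons c cs ih =>
      intro dd n ts
      have hc := h c (by simp)
      simp only [List.foldl_cons, pvAStep, hc, if_true]
      exact ih (fun x hx => h x (by simp [hx])) dd _ ts

theorem pvBNum_append (ns ds : List Char) :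
    pvBNum (ns ++ ds) = ds.foldl (fun a c => a * 10 + ((c.toNat : Int) - 48)) (pvBNum ns) := by
  simp [pvBNum, List.foldl_append]

-- the head of a non-empty dropWhile result fails the predicate
theorem pv_dropWhile_head {p : Char → Bool} {cs : List Char} {c : Char} {r : List Char}
    (h : cs.dropWhile p = c :: r) : p c = false := by
  induction cs with
  | nil => simp at h
  | cons x xs ih =>
      by_cases hx : p x
      · rw [List.dropWhile_cons_of_pos hx] at h; exact ih h
      · rw [List.dropWhile_cons_of_neg hx] at h
        cases h; simpa using hx

-- core correspondence: B's token fold and A's char fold produce the same dict and flag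
theorem pv_parse_rel (cs : List Char) : ∀ dd ts ns,
    (((pvTokens cs).foldl pvBStep (dd, ns, ts)).1 =
        (cs.foldl pvAStep (dd, pvBNum ns, ts)).1) ∧
    (((pvTokens cs).foldl pvBStep (dd, ns, ts)).2.2 =
        (cs.foldl pvAStep (dd, pvBNum ns, ts)).2.2) := by
  induction cs using pvTokens.induct with
  | case1 cs h =>
      intro dd ts ns
      have hsplit : cs.takeWhile PySem.Chars.isdigit ++ cs.dropWhile PySem.Chars.isdigit = cs :=
        List.takeWhile_append_dropWhile
      rw [h, List.append_nil] at hsplit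
      have hall : ∀ c ∈ cs, PySem.Chars.isdigit c = true := by
        intro c hc; rw [← hsplit] at hc; exact List.mem_takeWhile_imp hc
      rw [pvTokens, h]
      simp [pvA_digits cs hall]
  | case2 cs c r h ih =>
      intro dd ts ns
      have hsplit : cs.takeWhile PySem.Chars.isdigit ++ cs.dropWhile PySem.Chars.isdigit = cs :=
        List.takeWhile_append_dropWhile
      set ds := cs.takeWhile PySem.Chars.isdigit with hds
      have hcs : cs = ds ++ c :: r := by rw [← hsplit, h]
      have hall : ∀ x ∈ ds, PySem.Chars.isdigit x = true := by
        intro x hx; exact List.mem_takeWhile_imp hx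
      have hc : PySem.Chars.isdigit c = false := pv_dropWhile_head h
      have hA : ∀ st, cs.foldl pvAStep st = (c :: r).foldl pvAStep (ds.foldl pvAStep st) := by
        intro st; rw [hcs, List.foldl_append]
      rw [pvTokens, h, ← hds, hA, pvA_digits ds hall, ← pvBNum_append]
      simp only [List.foldl_cons]
      by_cases hP : c = 'P'
      · subst hP
        simp only [pvBStep, pvAStep, hc]
        norm_num
        exact ih dd ts (ns ++ ds)
      · by_cases hT : c = 'T'
        · subst hT
          simp only [pvBStep, pvAStep, hc]
          norm_num
          exact ih dd true (ns ++ ds)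
        · simp only [pvBStep, pvAStep, hc, Bool.false_eq_true, if_false, if_neg hP, if_neg hT]
          exact ih _ ts []

-- A's formatting fold equals prefix ++ B's filterMap
theorem pv_fmt_rel (dd : PySem.Dict (List Char) Int) (tags : List (List Char × List Char)) :
    ∀ init, tags.foldl (pvATag dd) init =
      init ++ tags.filterMap (fun p =>
        let v := dd.getD p.1 0
        if v ≠ 0 then
          some (PySem.Int.toChars v ++ (' ' :: p.2) ++ (if v > 1 then ['s'] else []) ++ [' '])
        else none) := by
  induction tags with
  | nil => intro init; simp
  | cons t ts ih =>
      intro init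
      simp only [List.foldl_cons, List.filterMap_cons]
      rw [ih]
      have hone : pvATag dd init t =
          init ++ (match dd.get? t.1 with
            | some v => if v ≠ 0 then
                [PySem.Int.toChars v ++ (' ' :: t.2) ++ (if v > 1 then ['s'] else []) ++ [' ']]
              else []
            | none => []) := by
        unfold pvATag
        cases dd.get? t.1 with
        | none => simp
        | some v => by_cases hv : v = 0 <;> simp [hv]
      rw [hone, List.append_assoc]
      congr 1
      cases hg : dd.get? t.1 with
      | none => simp [PySem.Dict.getD_eq_get?_getD, hg]
      | some v =>
          by_cases hv : v = 0 <;> simp [PySem.Dict.getD_eq_get?_getD, hg, hv]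

-- ===== VERDICT (by name: the statement is the Claim_ definition above) =====
theorem pretty_iso_duration_spec : Claim_equal_pretty_iso_duration := by
  intro s _
  show pretty_iso_duration s = pretty_iso_duration_alt s
  simp only [pretty_iso_duration, pretty_iso_duration_alt]
  have hdd : ((pvTokens s.toList).foldl pvBStep (PySem.Dict.empty, [], false)).1 =
      (s.toList.foldl pvAStep (PySem.Dict.empty, 0, false)).1 := by
    simpa [pvBNum] using (pv_parse_rel s.toList PySem.Dict.empty false []).1
  rw [hdd]
  set dd := (s.toList.foldl pvAStep (PySem.Dict.empty, 0, false)).1 with hdddef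
  rw [pv_fmt_rel dd pvIsoTags []]
  cases hH : dd.get? ['H'] with
  | none =>
      have hcont : dd.contains ['H'] = false := by
        rw [PySem.Dict.contains_eq_isSome_get?, hH]; rfl
      simp [hcont, pvIsoTags, pvTagTable, List.flatten_append, List.append_assoc]
  | some v =>
      have hcont : dd.contains ['H'] = true := by
        rw [PySem.Dict.contains_eq_isSome_get?, hH]; rfl
      simp [hH, hcont, pvIsoTags, pvTagTable, PySem.Dict.getD_eq_get?_getD, List.flatten_append, List.append_assoc]
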